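-- pv_equiv track=rewrite | github.com/benpicker/word2vec_via_implicit_matrix_factorization | code/ask_algebra_query.py | get_words_and_ops
-- ===== SOURCE A (Python) =====
-- def get_words_and_ops(query):
-- 	"""
-- 	Creates a dictionary with the words and their associated algebraic
-- 	operations.
-- 	"""
-- 	letters = set('abcdefghijklmnopqrstuvwxyzABCDEFGHIJKLMNOPQRSTUVWXYZ')
-- 	words_and_ops = {}
-- 	w = ""
-- 	op = "start"
-- 	for i in range(len(query)):
-- 		char = query[i]
-- 		if char in letters:
-- 			w += char
-- 		else:
-- 			words_and_ops[w] = op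
-- 			op = char
-- 			w = ""
-- 		if i == (len(query)-1):
-- 			words_and_ops[w] = op
-- 	return words_and_ops
-- ===== SOURCE B (Python) =====
-- def get_words_and_ops(query):
--     """
--     Creates a dictionary with the words and their associated algebraic
--     operations.
--     """
--     if not query:
--         return {}
--     # tokenize: letter-runs (words) and the single non-letter chars between them
--     words = ''.join(c if c.isalpha() else '\x00' for c in query).split('\x00')
--     seps = [c for c in query if not c.isalpha()]
--     d = {words[0]: 'start'}
--     for sep, word in zip(seps, words[1:]):
--         d[word] = sep
--     return d
-- ===== Notes on version B (the rewrite author's own statement) =====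
-- stated objective: idiomatic
-- what changed: Replaced A's char-by-char state machine that interleaves dict writes with scanning by a tokenize-then-pair decomposition: mask non-letters, split into words, collect separators, then zip separators with the following words to build the dict.
import Mathlib
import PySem

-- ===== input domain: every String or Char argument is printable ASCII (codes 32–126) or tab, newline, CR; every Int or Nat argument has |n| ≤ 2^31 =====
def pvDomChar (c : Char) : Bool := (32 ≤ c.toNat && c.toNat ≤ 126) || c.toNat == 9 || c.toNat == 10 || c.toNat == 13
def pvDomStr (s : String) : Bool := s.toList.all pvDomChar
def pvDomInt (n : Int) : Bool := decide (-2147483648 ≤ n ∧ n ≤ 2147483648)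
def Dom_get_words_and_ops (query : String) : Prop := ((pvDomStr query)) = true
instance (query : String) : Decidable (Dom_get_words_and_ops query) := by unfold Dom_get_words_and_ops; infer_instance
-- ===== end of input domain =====

-- B replaces A's one-pass state machine, which interleaves dict writes with scanning, by a
-- tokenize-then-pair decomposition (mask non-letters, split into words, zip separators with
-- the following words); same result, no speed claim.

-- ===== PORT A =====
-- set('abcdefghijklmnopqrstuvwxyzABCDEFGHIJKLMNOPQRSTUVWXYZ') — the string's characters as a literal list
def pvLetters : PySem.Set Char :=
  PySem.Set.ofList ['a','b','c','d','e','f','g','h','i','j','k','l','m','n','o','p','q','r','s','t','u','v','w','x','y','z','A','B','C','D','E','F','G','H','I','J','K','L','M','N','O','P','Q','R','S','T','U','V','W','X','Y','Z']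

-- A's loop over the remaining characters; w kept as List Char (Python w += char).
-- Python's 'if i == (len(query)-1)' final insert is the cs-empty case of the inner match.
def pvLoopA (d : PySem.Dict String String) (w : List Char) (op : String) :
    List Char → PySem.Dict String String
  | [] => d
  | c :: cs =>
    if pvLetters.contains c then
      match cs with
      | [] => d.insert (String.ofList (w ++ [c])) op
      | _ :: _ => pvLoopA d (w ++ [c]) op cs
    else
      match cs with
      | [] => (d.insert (String.ofList w) op).insert (String.ofList []) c.toString
      | _ :: _ => pvLoopA (d.insert (String.ofList w) op) [] c.toString cs

def get_words_and_ops (query : String) : List (String × String) :=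
  (pvLoopA PySem.Dict.empty [] "start" query.toList).items

-- ===== PORT B =====
-- ''.join(c if c.isalpha() else '\x00' for c in query)  (a char-by-char map; Char.isAlpha = ASCII
-- letters, which agrees with Python's str.isalpha on the ASCII domain)
def pvMask (cs : List Char) : List Char :=
  cs.map (fun c => if c.isAlpha then c else '\x00')

def get_words_and_ops_alt (query : String) : List (String × String) :=
  if query.toList = [] then []
  else
    let words := PySem.Chars.splitOn (pvMask query.toList) ['\x00']
    let seps := query.toList.filter (fun c => !c.isAlpha)
    let d0 := PySem.Dict.empty.insert (String.ofList (words.headD [])) "start"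
    ((seps.zip words.tail).foldl
      (fun d p => d.insert (String.ofList p.2) p.1.toString) d0).items

-- ===== PRECONDITION & SPEC =====
def Spec_get_words_and_ops (query : String) (out : List (String × String)) : Prop := out = get_words_and_ops_alt query
instance (query : String) (out : List (String × String)) : Decidable (Spec_get_words_and_ops query out) := by unfold Spec_get_words_and_ops; infer_instance

-- ===== CLAIM (what is proved, stated in full; the proofs are below) =====
def Claim_equal_get_words_and_ops : Prop := ∀ (query : String), Dom_get_words_and_ops query → Spec_get_words_and_ops query (get_words_and_ops query)

-- ===== LEMMAS AND PROOFS =====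

-- A's membership test in the letter set is exactly Char.isAlpha
set_option maxRecDepth 8192 in
lemma pvLetters_contains (c : Char) : pvLetters.contains c = c.isAlpha := by
  have he : pvLetters = ['a','b','c','d','e','f','g','h','i','j','k','l','m','n','o','p','q','r','s','t','u','v','w','x','y','z','A','B','C','D','E','F','G','H','I','J','K','L','M','N','O','P','Q','R','S','T','U','V','W','X','Y','Z'] := by decide
  rw [Bool.eq_iff_iff, PySem.Set.contains_iff, he]
  constructor
  · intro h
    simp only [List.mem_cons, List.not_mem_nil, or_false] at h
    rcases h with rfl|rfl|rfl|rfl|rfl|rfl|rfl|rfl|rfl|rfl|rfl|rfl|rfl|rfl|rfl|rfl|rfl|rfl|rfl|rfl|rfl|rfl|rfl|rfl|rfl|rfl|rfl|rfl|rfl|rfl|rfl|rfl|rfl|rfl|rfl|rfl|rfl|rfl|rfl|rfl|rfl|rfl|rfl|rfl|rfl|rfl|rfl|rfl|rfl|rfl|rfl|rfl <;> decide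
  · intro h
    simp only [Char.isAlpha, Char.isUpper, Char.isLower, Bool.or_eq_true, Bool.and_eq_true,
      decide_eq_true_eq, UInt32.le_iff_toNat_le] at h
    have e1 : ('A').val.toNat = 65 := rfl
    have e2 : ('Z').val.toNat = 90 := rfl
    have e3 : ('a').val.toNat = 97 := rfl
    have e4 : ('z').val.toNat = 122 := rfl
    rw [e1, e2, e3, e4] at h
    have hc : Char.ofNat c.val.toNat = c := Char.ofNat_toNat c
    rw [← hc]
    obtain ⟨h1, h2⟩ | ⟨h1, h2⟩ := h <;> interval_cases (c.val.toNat) <;> decide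

-- proof-side recursive characterisation of str.split('\x00')
def pvSplit : List Char → List (List Char)
  | [] => [[]]
  | c :: cs =>
    if c = '\x00' then [] :: pvSplit cs
    else
      match pvSplit cs with
      | [] => [[c]]
      | h :: t => (c :: h) :: t

lemma pvSplit_ne_nil (l : List Char) : pvSplit l ≠ [] := by
  cases l with
  | nil => simp [pvSplit]
  | cons c cs =>
    simp only [pvSplit]
    split <;> [simp; (split <;> simp)]

lemma splitOn_go_char :
    ∀ (fuel : Nat) (l cur : List Char) (acc : List (List Char)), l.length < fuel →
      PySem.Chars.splitOn.go ['\x00'] fuel l cur acc =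
        acc.reverse ++ (cur.reverse ++ (pvSplit l).headD []) :: (pvSplit l).tail := by
  intro fuel
  induction fuel with
  | zero => intro l cur acc h; omega
  | succ n ih =>
    intro l cur acc h
    cases l with
    | nil => simp [PySem.Chars.splitOn.go, pvSplit]
    | cons c rest =>
      rw [PySem.Chars.splitOn.go]
      by_cases hc : c = '\x00'
      · subst hc
        have hp : List.isPrefixOf ['\x00'] ('\x00' :: rest) = true := by simp [List.isPrefixOf]
        rw [if_pos hp]
        simp only [List.length_cons, List.drop_succ_cons, List.length_nil, List.drop_zero]
        rw [ih rest [] _ (by simpa using Nat.lt_of_succ_lt_succ h)]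
        obtain ⟨h0, t0, hs⟩ : ∃ h0 t0, pvSplit rest = h0 :: t0 := by
          cases hh : pvSplit rest with
          | nil => exact absurd hh (pvSplit_ne_nil rest)
          | cons a b => exact ⟨a, b, rfl⟩
        simp [pvSplit, hs]
      · have hp : List.isPrefixOf ['\x00'] (c :: rest) = false := by
          simp [List.isPrefixOf]; exact fun hh => (hc hh.symm).elim
        rw [if_neg (by simp [hp])]
        rw [ih rest (c :: cur) acc (by simpa using Nat.lt_of_succ_lt_succ h)]
        obtain ⟨h0, t0, hs⟩ : ∃ h0 t0, pvSplit rest = h0 :: t0 := by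
          cases hh : pvSplit rest with
          | nil => exact absurd hh (pvSplit_ne_nil rest)
          | cons a b => exact ⟨a, b, rfl⟩
        simp [pvSplit, hc, hs]

lemma splitOn_eq_pvSplit (l : List Char) :
    PySem.Chars.splitOn l ['\x00'] = pvSplit l := by
  rw [PySem.Chars.splitOn, splitOn_go_char (l.length + 1) l [] [] (by omega)]
  obtain ⟨h0, t0, hs⟩ : ∃ h0 t0, pvSplit l = h0 :: t0 := by
    cases hh : pvSplit l with
    | nil => exact absurd hh (pvSplit_ne_nil l)
    | cons a b => exact ⟨a, b, rfl⟩
  simp [hs]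

lemma alpha_ne_null {c : Char} (h : c.isAlpha = true) : c ≠ '\x00' := by
  intro hc; subst hc; exact absurd h (by decide)

lemma pvLetters_mem (c : Char) : c ∈ pvLetters ↔ c.isAlpha = true := by
  rw [← PySem.Set.contains_iff, pvLetters_contains]

lemma pvSplit_mask_cons_alpha {c : Char} (h : c.isAlpha = true) (cs : List Char) :
    pvSplit (pvMask (c :: cs)) =
      (c :: (pvSplit (pvMask cs)).headD []) :: (pvSplit (pvMask cs)).tail := by
  obtain ⟨h0, t0, hs⟩ : ∃ h0 t0, pvSplit (pvMask cs) = h0 :: t0 := by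
    cases hh : pvSplit (pvMask cs) with
    | nil => exact absurd hh (pvSplit_ne_nil _)
    | cons a b => exact ⟨a, b, rfl⟩
  have hm : pvMask (c :: cs) = c :: pvMask cs := by simp [pvMask, h]
  rw [hm, pvSplit, if_neg (alpha_ne_null h), hs]
  simp

lemma pvSplit_mask_cons_nonalpha {c : Char} (h : c.isAlpha = false) (cs : List Char) :
    pvSplit (pvMask (c :: cs)) = [] :: pvSplit (pvMask cs) := by
  have hm : pvMask (c :: cs) = '\x00' :: pvMask cs := by simp [pvMask, h]
  rw [hm, pvSplit, if_pos rfl]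

-- the heart of the proof: A's state machine equals B's zip-fold over the tokens
lemma pvLoopA_eq_fold :
    ∀ (cs : List Char) (d : PySem.Dict String String) (w : List Char) (op : String), cs ≠ [] →
      pvLoopA d w op cs =
        ((cs.filter (fun c => !c.isAlpha)).zip (pvSplit (pvMask cs)).tail).foldl
          (fun d p => d.insert (String.ofList p.2) p.1.toString)
          (d.insert (String.ofList (w ++ (pvSplit (pvMask cs)).headD [])) op) := by
  intro cs
  induction cs with
  | nil => intro d w op h; exact absurd rfl h
  | cons c cs' ih =>
    intro d w op _
    by_cases hA : c.isAlpha = true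
    · have hb : pvLetters.contains c = true := by rw [pvLetters_contains]; exact hA
      cases cs' with
      | nil =>
        simp [pvLoopA, pvLetters_mem, hA, pvMask, pvSplit, alpha_ne_null hA]
      | cons c2 cs2 =>
        have hne : (c2 :: cs2) ≠ ([] : List Char) := by simp
        rw [pvSplit_mask_cons_alpha hA (c2 :: cs2)]
        conv_lhs => rw [pvLoopA, hb, if_pos rfl]
        show pvLoopA d (w ++ [c]) op (c2 :: cs2) = _
        rw [ih d (w ++ [c]) op hne]
        simp [hA, List.append_assoc]
    · have hA' : c.isAlpha = false := by simpa using hA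
      have hb : pvLetters.contains c = false := by rw [pvLetters_contains]; exact hA'
      cases cs' with
      | nil =>
        simp [pvLoopA, pvLetters_mem, hA', pvMask, pvSplit]
      | cons c2 cs2 =>
        have hne : (c2 :: cs2) ≠ ([] : List Char) := by simp
        obtain ⟨h0, t0, hs⟩ : ∃ h0 t0, pvSplit (pvMask (c2 :: cs2)) = h0 :: t0 := by
          cases hh : pvSplit (pvMask (c2 :: cs2)) with
          | nil => exact absurd hh (pvSplit_ne_nil _)
          | cons a b => exact ⟨a, b, rfl⟩
        rw [pvSplit_mask_cons_nonalpha hA' (c2 :: cs2)]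
        conv_lhs => rw [pvLoopA, hb]
        rw [if_neg (by simp)]
        show pvLoopA (d.insert (String.ofList w) op) [] c.toString (c2 :: cs2) = _
        rw [ih (d.insert (String.ofList w) op) [] c.toString hne]
        simp [hA', hs]

-- ===== VERDICT (by name: the statement is the Claim_ definition above) =====
theorem get_words_and_ops_spec : Claim_equal_get_words_and_ops := by
  intro query _
  unfold Spec_get_words_and_ops get_words_and_ops get_words_and_ops_alt
  cases hq : query.toList with
  | nil => simp [pvLoopA]; rfl
  | cons c cs =>
    rw [if_neg (by simp)]
    simp only [splitOn_eq_pvSplit]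
    rw [pvLoopA_eq_fold (c :: cs) PySem.Dict.empty [] "start" (by simp)]
    simp
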